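-- pv_equiv track=rewrite | github.com/daniel-reich/turbo-robot | 82AvsFFQprj43XCDS_22.py | no_strangers
-- ===== SOURCE A (Python) =====
-- def no_strangers(txt):
--   acq = []
--   fr = []
--   total = {}
--   txt = txt.replace(".", "")
--   txt = txt.replace(",", "")
--   txt = txt.replace("\"", "")
--   txt = txt.lower()
--   words = txt.split(" ")
--   for word in words:
--     if (word in total):
--       total[word] += 1
--       if (total[word] == 3):
--         acq.append(word)
--       if (total[word] == 5):
--         fr.append(word)
--         acq.remove(word)
--     else:
--       total[word] = 1
--   return [acq, fr]
-- ===== SOURCE B (Python) =====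
-- def no_strangers(txt):
--   words = txt.replace(".", "").replace(",", "").replace("\"", "").lower().split(" ")
--   total = {}
--   for w in words:
--     total[w] = total.get(w, 0) + 1
--   acq = []
--   fr = []
--   run = {}
--   for w in words:
--     c = run.get(w, 0) + 1
--     run[w] = c
--     if c == 3 and total[w] < 5:
--       acq.append(w)
--     elif c == 5:
--       fr.append(w)
--   return [acq, fr]
-- ===== Notes on version B (the rewrite author's own statement) =====
-- stated objective: simpler
-- what changed: Replaces A's incremental append-at-3/remove-at-5 list juggling with two passes: one pass builds the final count table, then a second pass over the words with a running-count dict appends to acq (3rd occurrence and final count < 5) or fr (5th occurrence) directly, never removing from a list.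
import Mathlib
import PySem

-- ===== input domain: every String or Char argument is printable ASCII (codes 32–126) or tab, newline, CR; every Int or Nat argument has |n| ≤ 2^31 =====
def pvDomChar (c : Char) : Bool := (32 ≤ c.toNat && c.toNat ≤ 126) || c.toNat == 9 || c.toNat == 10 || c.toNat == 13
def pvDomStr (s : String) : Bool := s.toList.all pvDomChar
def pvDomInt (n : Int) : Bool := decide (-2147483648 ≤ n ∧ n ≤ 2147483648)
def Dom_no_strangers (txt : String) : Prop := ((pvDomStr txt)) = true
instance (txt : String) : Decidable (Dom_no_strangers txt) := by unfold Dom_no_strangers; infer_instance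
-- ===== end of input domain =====

-- B replaces A's incremental append/remove juggling by one full count pass plus a
-- running-count pass that decides membership from final counts (objective: simpler).

-- ===== PORT A =====
-- One iteration of A's loop over `words`; state (acq, fr, total).
-- `(remove? …).getD acq` only totalizes Python's acq.remove(word): the word is always
-- present there (it was appended when its count reached 3), so the default never fires.
def noStrangersStepA (st : List String × List String × PySem.Dict String Int)
    (word : String) : List String × List String × PySem.Dict String Int :=
  let acq := st.1
  let fr := st.2.1
  let total := st.2.2
  if total.contains word then
    let c := total.getD word 0 + 1      -- total[word] += 1 (key present by the guard)
    let total := total.insert word c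
    let acq := if c = 3 then acq ++ [word] else acq
    if c = 5 then ((PySem.List.remove? acq word).getD acq, fr ++ [word], total)
    else (acq, fr, total)
  else (acq, fr, total.insert word 1)

def no_strangers (txt : String) : List (List String) :=
  let txt := PySem.Str.replace txt "." ""
  let txt := PySem.Str.replace txt "," ""
  let txt := PySem.Str.replace txt "\"" ""
  let txt := PySem.Str.lower txt
  let words := (PySem.Str.split? txt " ").getD []   -- sep " " ≠ "", so split? is always some
  let st := words.foldl noStrangersStepA ([], [], PySem.Dict.empty)
  [st.1, st.2.1]

-- ===== PORT B =====
-- One iteration of B's second pass; `tot` is the completed count table.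
-- `tot.getD w 0` totalizes Python's total[w]: w ∈ words, so the key is present.
def noStrangersStepB (tot : PySem.Dict String Int)
    (st : List String × List String × PySem.Dict String Int)
    (w : String) : List String × List String × PySem.Dict String Int :=
  let acq := st.1
  let fr := st.2.1
  let run := st.2.2
  let c := run.getD w 0 + 1
  let run := run.insert w c
  if c = 3 ∧ tot.getD w 0 < 5 then (acq ++ [w], fr, run)
  else if c = 5 then (acq, fr ++ [w], run)
  else (acq, fr, run)

def no_strangers_alt (txt : String) : List (List String) :=
  let words := ((PySem.Str.split?
    (PySem.Str.lower (PySem.Str.replace (PySem.Str.replace (PySem.Str.replace txt "." "") "," "") "\"" "")) " ").getD [])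
  let tot := words.foldl (fun d w => d.insert w (d.getD w 0 + 1)) PySem.Dict.empty
  let st := words.foldl (noStrangersStepB tot) ([], [], PySem.Dict.empty)
  [st.1, st.2.1]

-- ===== PRECONDITION & SPEC =====
def Spec_no_strangers (txt : String) (out : List (List String)) : Prop := out = no_strangers_alt txt
instance (txt : String) (out : List (List String)) : Decidable (Spec_no_strangers txt out) := by unfold Spec_no_strangers; infer_instance

-- ===== CLAIM (what is proved, stated in full; the proofs are below) =====
def Claim_equal_no_strangers : Prop := ∀ (txt : String), Dom_no_strangers txt → Spec_no_strangers txt (no_strangers txt)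

-- ===== LEMMAS AND PROOFS =====

lemma filter_erase_of_not (l : List String) (w : String) (p : String → Bool)
    (h : p w = false) : (l.erase w).filter p = l.filter p := by
  induction l with
  | nil => simp
  | cons a l ih =>
    by_cases haw : a = w
    · subst haw; simp [List.erase_cons_head, h]
    · rw [List.erase_cons_tail (by simpa using haw)]
      simp [List.filter_cons, ih]

lemma count_append_singleton (l : List String) (w v : String) :
    (l ++ [w]).count v = l.count v + (if v = w then 1 else 0) := by
  rcases eq_or_ne v w with rfl | hvw
  · simp [List.count_append]
  · simp [List.count_append, List.count_eq_zero, hvw]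

-- The simulation invariant: with `words = p ++ s` already split, A's state after p has
-- total = prefix counts, acq holding (exactly once) the words with prefix count 3 or 4;
-- B's acq is A's acq filtered by "final count < 5".
lemma ns_sim (words : List String) (tot : PySem.Dict String Int)
    (htot : ∀ v, tot.getD v 0 = (words.count v : Int)) :
    ∀ (s p acqA acqB fr : List String) (dA dB : PySem.Dict String Int),
    p ++ s = words →
    (∀ v, dA.get? v = if p.count v = 0 then none else some (p.count v : Int)) →
    (∀ v, dB.getD v 0 = (p.count v : Int)) →
    (∀ v, acqA.count v = if p.count v = 3 ∨ p.count v = 4 then 1 else 0) →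
    acqB = acqA.filter (fun v => decide (words.count v < 5)) →
    (s.foldl (noStrangersStepB tot) (acqB, fr, dB)).1
        = (s.foldl noStrangersStepA (acqA, fr, dA)).1.filter (fun v => decide (words.count v < 5))
    ∧ (s.foldl (noStrangersStepB tot) (acqB, fr, dB)).2.1
        = (s.foldl noStrangersStepA (acqA, fr, dA)).2.1
    ∧ (∀ v, (s.foldl noStrangersStepA (acqA, fr, dA)).1.count v
        = if words.count v = 3 ∨ words.count v = 4 then 1 else 0) := by
  intro s
  induction s with
  | nil =>
    intro p acqA acqB fr dA dB hp hdA hdB hcnt hBA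
    simp only [List.append_nil] at hp
    subst hp
    simp only [List.foldl_nil]
    exact ⟨hBA, trivial, hcnt⟩
  | cons w s ih =>
    intro p acqA acqB fr dA dB hp hdA hdB hcnt hBA
    have hp' : (p ++ [w]) ++ s = words := by simpa using hp
    have hcnt1 : ∀ v : String, v ≠ w → List.count v [w] = 0 := by
      intro v hv; simp [List.count_eq_zero, hv]
    have hgetD : dA.getD w 0 = (if p.count w = 0 then (0:Int) else (p.count w : Int)) := by
      rw [PySem.Dict.getD_eq_get?_getD, hdA w]
      by_cases h : p.count w = 0 <;> simp [h]
    have hwordsge : (p.count w) + 1 ≤ words.count w := by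
      have h : words.count w = p.count w + (w :: s).count w := by
        rw [← hp, List.count_append]
      simp only [List.count_cons_self] at h
      omega
    simp only [List.foldl_cons]
    by_cases h0 : p.count w = 0
    · -- word not yet seen
      have hcontains : dA.contains w = false := by
        rw [PySem.Dict.contains_eq_isSome_get?, hdA w]; simp [h0]
      have hstepA : noStrangersStepA (acqA, fr, dA) w = (acqA, fr, dA.insert w 1) := by
        simp [noStrangersStepA, hcontains]
      have hstepB : noStrangersStepB tot (acqB, fr, dB) w = (acqB, fr, dB.insert w 1) := by
        simp [noStrangersStepB, hdB w, h0]
      rw [hstepA, hstepB]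
      refine ih (p ++ [w]) acqA acqB fr _ _ hp' ?_ ?_ ?_ hBA
      · intro v
        rw [PySem.Dict.get?_insert, count_append_singleton]
        rcases eq_or_ne v w with rfl | hv
        · simp [h0]
        · simp [hv, hdA v]
      · intro v
        rw [PySem.Dict.getD_insert, count_append_singleton]
        rcases eq_or_ne v w with rfl | hv
        · simp [h0]
        · simp [hv, hdB v]
      · intro v
        rw [hcnt v, count_append_singleton]
        rcases eq_or_ne v w with rfl | hv
        · simp [h0]
        · simp [hv]
    · -- word already counted: its count becomes p.count w + 1
      have hcontains : dA.contains w = true := by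
        rw [PySem.Dict.contains_eq_isSome_get?, hdA w]; simp [h0]
      have hc : dA.getD w 0 + 1 = ((p.count w : Int) + 1) := by rw [hgetD]; simp [h0]
      by_cases h2 : p.count w = 2
      · -- third occurrence: A appends; B appends iff final count < 5
        have hcI : (p.count w : Int) = 2 := by exact_mod_cast h2
        have hstepA : noStrangersStepA (acqA, fr, dA) w
            = (acqA ++ [w], fr, dA.insert w 3) := by
          simp only [noStrangersStepA, hcontains, if_true, hc, hcI]
          norm_num
        have hpredfilter : (acqA ++ [w]).filter (fun v => decide (words.count v < 5))
            = acqB ++ (if words.count w < 5 then [w] else []) := by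
          rw [List.filter_append, hBA]
          by_cases hlt : words.count w < 5 <;> simp [hlt]
        have hinv1 : ∀ v, (dA.insert w 3).get? v
            = if (p ++ [w]).count v = 0 then none else some (((p ++ [w]).count v : Int)) := by
          intro v
          rw [PySem.Dict.get?_insert, count_append_singleton]
          rcases eq_or_ne v w with rfl | hv
          · simp [h2]
          · simp [hv, hdA v]
        have hinv2 : ∀ v, (dB.insert w 3).getD v 0 = (((p ++ [w]).count v : Int)) := by
          intro v
          rw [PySem.Dict.getD_insert, count_append_singleton]
          rcases eq_or_ne v w with rfl | hv
          · simp [h2]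
          · simp [hv, hdB v]
        have hinv3 : ∀ v, (acqA ++ [w]).count v
            = if (p ++ [w]).count v = 3 ∨ (p ++ [w]).count v = 4 then 1 else 0 := by
          intro v
          rw [count_append_singleton, count_append_singleton, hcnt v]
          rcases eq_or_ne v w with rfl | hv
          · simp [h2]
          · simp [hv]
        by_cases hlt : words.count w < 5
        · have h5' : tot.getD w 0 < 5 := by rw [htot w]; exact_mod_cast hlt
          have hstepB : noStrangersStepB tot (acqB, fr, dB) w
              = (acqB ++ [w], fr, dB.insert w 3) := by
            simp only [noStrangersStepB, hdB w, hcI]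
            rw [if_pos ⟨by norm_num, h5'⟩]
            norm_num
          rw [hstepA, hstepB]
          refine ih (p ++ [w]) (acqA ++ [w]) _ fr _ _ hp' hinv1 hinv2 hinv3 ?_
          rw [hpredfilter, if_pos hlt]
        · have h5' : ¬ tot.getD w 0 < 5 := by
            rw [htot w]; intro h; exact hlt (by exact_mod_cast h)
          have hstepB : noStrangersStepB tot (acqB, fr, dB) w
              = (acqB, fr, dB.insert w 3) := by
            simp only [noStrangersStepB, hdB w, hcI]
            rw [if_neg (fun hand => h5' hand.2), if_neg (by norm_num)]
            norm_num
          rw [hstepA, hstepB]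
          refine ih (p ++ [w]) (acqA ++ [w]) _ fr _ _ hp' hinv1 hinv2 hinv3 ?_
          rw [hpredfilter, if_neg hlt, List.append_nil]
      · by_cases h4 : p.count w = 4
        · -- fifth occurrence: A removes from acq, both append to fr
          have hcI : (p.count w : Int) = 4 := by exact_mod_cast h4
          have hwmem : w ∈ acqA := by
            have h := hcnt w
            rw [h4] at h
            simp at h
            exact List.count_pos_iff.mp (by omega)
          have hrem : (PySem.List.remove? acqA w).getD acqA = acqA.erase w := by
            rw [PySem.List.remove?_eq_some_erase acqA w hwmem]; rfl
          have hstepA : noStrangersStepA (acqA, fr, dA) w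
              = (acqA.erase w, fr ++ [w], dA.insert w 5) := by
            simp only [noStrangersStepA, hcontains, if_true, hc, hcI]
            norm_num [hrem]
          have hstepB : noStrangersStepB tot (acqB, fr, dB) w
              = (acqB, fr ++ [w], dB.insert w 5) := by
            simp only [noStrangersStepB, hdB w, hcI]
            rw [if_neg (fun hand => by have h := hand.1; norm_num at h), if_pos (by norm_num)]
            norm_num
          have hpred : (decide (words.count w < 5)) = false := by
            simp only [decide_eq_false_iff_not, not_lt]
            omega
          rw [hstepA, hstepB]
          refine ih (p ++ [w]) (acqA.erase w) _ (fr ++ [w]) _ _ hp' ?_ ?_ ?_ ?_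
          · intro v
            rw [PySem.Dict.get?_insert, count_append_singleton]
            rcases eq_or_ne v w with rfl | hv
            · simp [h4]
            · simp [hv, hdA v]
          · intro v
            rw [PySem.Dict.getD_insert, count_append_singleton]
            rcases eq_or_ne v w with rfl | hv
            · simp [h4]
            · simp [hv, hdB v]
          · intro v
            rw [count_append_singleton]
            rcases eq_or_ne v w with rfl | hv
            · rw [List.count_erase_self, hcnt v, h4]; simp
            · rw [List.count_erase_of_ne hv, hcnt v]; simp [hv]
          · rw [hBA, filter_erase_of_not _ _ _ hpred]
        · -- any other occurrence: acq and fr are unchanged on both sides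
          have hc3 : ¬ ((p.count w : Int) + 1 = 3) := by
            intro h; apply h2; exact_mod_cast (by omega : (p.count w : Int) = 2)
          have hc5 : ¬ ((p.count w : Int) + 1 = 5) := by
            intro h; apply h4; exact_mod_cast (by omega : (p.count w : Int) = 4)
          have hstepA : noStrangersStepA (acqA, fr, dA) w
              = (acqA, fr, dA.insert w ((p.count w : Int) + 1)) := by
            simp only [noStrangersStepA, hcontains, if_true, hc]
            rw [if_neg hc3, if_neg hc5]
          have hstepB : noStrangersStepB tot (acqB, fr, dB) w
              = (acqB, fr, dB.insert w ((p.count w : Int) + 1)) := by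
            simp only [noStrangersStepB, hdB w]
            rw [if_neg (fun hand => hc3 hand.1), if_neg hc5]
          rw [hstepA, hstepB]
          refine ih (p ++ [w]) acqA _ fr _ _ hp' ?_ ?_ ?_ hBA
          · intro v
            rw [PySem.Dict.get?_insert, count_append_singleton]
            rcases eq_or_ne v w with rfl | hv
            · simp
            · simp [hv, hdA v]
          · intro v
            rw [PySem.Dict.getD_insert, count_append_singleton]
            rcases eq_or_ne v w with rfl | hv
            · simp
            · simp [hv, hdB v]
          · intro v
            rw [count_append_singleton, hcnt v]
            rcases eq_or_ne v w with rfl | hv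
            · split_ifs <;> omega
            · simp [hv]

-- Instantiate the simulation at the start state and discharge the final filter.
lemma ns_core (words : List String) :
    [(words.foldl noStrangersStepA (([] : List String), ([] : List String), PySem.Dict.empty)).1,
     (words.foldl noStrangersStepA (([] : List String), ([] : List String), PySem.Dict.empty)).2.1]
    = [(words.foldl (noStrangersStepB
          (words.foldl (fun d w => d.insert w (d.getD w 0 + 1)) PySem.Dict.empty))
          (([] : List String), ([] : List String), PySem.Dict.empty)).1,
       (words.foldl (noStrangersStepB
          (words.foldl (fun d w => d.insert w (d.getD w 0 + 1)) PySem.Dict.empty))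
          (([] : List String), ([] : List String), PySem.Dict.empty)).2.1] := by
  have htot : ∀ v, (words.foldl (fun d w => d.insert w (d.getD w 0 + 1)) PySem.Dict.empty).getD v 0
      = (words.count v : Int) := by
    intro v
    rw [PySem.Dict.getD_foldl_insert_add_one, PySem.Dict.getD_empty]
    ring
  obtain ⟨h1, h2, h3⟩ := ns_sim words _ htot words [] [] [] [] PySem.Dict.empty PySem.Dict.empty
    (by simp) (by simp [PySem.Dict.get?_empty]) (by simp [PySem.Dict.getD_empty])
    (by simp) (by simp)
  have hid : ((words.foldl noStrangersStepA ([], [], PySem.Dict.empty)).1).filter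
      (fun v => decide (words.count v < 5))
      = (words.foldl noStrangersStepA ([], [], PySem.Dict.empty)).1 := by
    apply List.filter_eq_self.mpr
    intro a ha
    have hc := h3 a
    have hpos : 0 < (words.foldl noStrangersStepA ([], [], PySem.Dict.empty)).1.count a :=
      List.count_pos_iff.mpr ha
    simp only [decide_eq_true_eq]
    by_contra hge
    have : ¬ (words.count a = 3 ∨ words.count a = 4) := by omega
    rw [if_neg this] at hc
    omega
  rw [h1, hid] at *
  rw [h2]

-- ===== VERDICT (by name: the statement is the Claim_ definition above) =====
theorem no_strangers_spec : Claim_equal_no_strangers := by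
  intro txt _
  unfold Spec_no_strangers no_strangers no_strangers_alt
  exact ns_core _
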